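-- pv_equiv track=rewrite | github.com/evenstar123/Melochord | scripts/preprocess-hooktheory.py | root_to_degree
-- ===== SOURCE A (Python) =====
-- MAJOR_SCALE = [0, 2, 4, 5, 7, 9, 11]
--
-- MINOR_SCALE = [0, 2, 3, 5, 7, 8, 10]
--
-- def root_to_degree(root_pc, tonic_pc, mode):
--     """将根音 pitch_class 转为级数 (1-7)"""
--     semitones = (root_pc - tonic_pc) % 12
--     scale = MAJOR_SCALE if mode in ('major', 'lydian', 'mixolydian') else MINOR_SCALE
--
--     # 精确匹配音阶音
--     if semitones in scale:
--         return scale.index(semitones) + 1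
--
--     # 最近匹配
--     best_deg = 1
--     best_dist = 12
--     for i, s in enumerate(scale):
--         dist = min(abs(semitones - s), 12 - abs(semitones - s))
--         if dist < best_dist:
--             best_dist = dist
--             best_deg = i + 1
--     return best_deg
-- ===== SOURCE B (Python) =====
-- # Precomputed lookup tables: degree for every pitch-class offset 0..11,
-- # derived once from the nearest-scale-tone rule (first minimum wins).
-- MAJOR_DEGREE = [1, 1, 2, 2, 3, 4, 4, 5, 5, 6, 6, 7]
-- MINOR_DEGREE = [1, 1, 2, 3, 3, 4, 4, 5, 6, 6, 7, 1]
--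
-- def root_to_degree(root_pc, tonic_pc, mode):
--     table = MAJOR_DEGREE if mode in ('major', 'lydian', 'mixolydian') else MINOR_DEGREE
--     return table[(root_pc - tonic_pc) % 12]
-- ===== Notes on version B (the rewrite author's own statement) =====
-- stated objective: simpler
-- what changed: Replaced A's membership test + list.index fast path and nearest-tone accumulator loop by a direct O(1) lookup into a 12-entry precomputed semitone->degree table (no scan, no distance computation at runtime).
import Mathlib
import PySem

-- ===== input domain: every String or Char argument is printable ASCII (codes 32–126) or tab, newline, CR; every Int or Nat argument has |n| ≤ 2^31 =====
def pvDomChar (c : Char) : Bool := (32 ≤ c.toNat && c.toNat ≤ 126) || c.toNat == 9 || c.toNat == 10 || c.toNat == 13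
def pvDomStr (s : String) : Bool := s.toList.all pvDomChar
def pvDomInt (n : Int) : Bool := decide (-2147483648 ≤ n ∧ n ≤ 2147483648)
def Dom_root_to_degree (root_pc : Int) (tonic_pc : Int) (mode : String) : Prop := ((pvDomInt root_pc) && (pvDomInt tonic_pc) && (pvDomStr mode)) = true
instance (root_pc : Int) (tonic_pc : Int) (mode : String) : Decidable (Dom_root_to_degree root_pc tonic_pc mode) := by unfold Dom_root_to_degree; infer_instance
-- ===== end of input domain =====

-- B replaces A's membership test + index fast path and nearest-tone distance loop by one
-- direct lookup into a 12-entry precomputed semitone->degree table (objective: simpler).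

-- ===== PORT A =====
def MAJOR_SCALE : List Int := [0, 2, 4, 5, 7, 9, 11]
def MINOR_SCALE : List Int := [0, 2, 3, 5, 7, 8, 10]

-- A's nearest-match fallback loop: state (best_deg, best_dist), init (1, 12)
def pvAnearest (semitones : Int) (scale : List Int) : Int :=
  ((PySem.List.enumerate scale).foldl
    (fun (st : Int × Int) p =>
      let dist := min |semitones - p.2| (12 - |semitones - p.2|)
      if dist < st.2 then (p.1 + 1, dist) else st)
    (1, 12)).1

def pvAcore (semitones : Int) (scale : List Int) : Int :=
  if semitones ∈ scale then
    match PySem.List.index? scale semitones with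
    | some i => (i : Int) + 1
    | none => 1  -- unreachable: the membership guard makes scale.index total here
  else pvAnearest semitones scale

def root_to_degree (root_pc : Int) (tonic_pc : Int) (mode : String) : Int :=
  pvAcore (PySem.Int.mod (root_pc - tonic_pc) 12)
    (if mode = "major" ∨ mode = "lydian" ∨ mode = "mixolydian" then MAJOR_SCALE else MINOR_SCALE)

-- ===== PORT B =====
def MAJOR_DEGREE : List Int := [1, 1, 2, 2, 3, 4, 4, 5, 5, 6, 6, 7]
def MINOR_DEGREE : List Int := [1, 1, 2, 3, 3, 4, 4, 5, 6, 6, 7, 1]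

def root_to_degree_alt (root_pc : Int) (tonic_pc : Int) (mode : String) : Int :=
  -- table[(root_pc - tonic_pc) % 12]: the index is always 0..11, so pyGet? is some; getD 0 only totalises
  (PySem.List.pyGet?
    (if mode = "major" ∨ mode = "lydian" ∨ mode = "mixolydian" then MAJOR_DEGREE else MINOR_DEGREE)
    (PySem.Int.mod (root_pc - tonic_pc) 12)).getD 0

-- ===== PRECONDITION & SPEC =====
def Spec_root_to_degree (root_pc : Int) (tonic_pc : Int) (mode : String) (out : Int) : Prop := out = root_to_degree_alt root_pc tonic_pc mode
instance (root_pc : Int) (tonic_pc : Int) (mode : String) (out : Int) : Decidable (Spec_root_to_degree root_pc tonic_pc mode out) := by unfold Spec_root_to_degree; infer_instance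

-- ===== CLAIM (what is proved, stated in full; the proofs are below) =====
def Claim_equal_root_to_degree : Prop := ∀ (root_pc : Int) (tonic_pc : Int) (mode : String), Dom_root_to_degree root_pc tonic_pc mode → Spec_root_to_degree root_pc tonic_pc mode (root_to_degree root_pc tonic_pc mode)

-- ===== LEMMAS AND PROOFS =====
set_option maxRecDepth 10000 in
lemma pvCore_eq (m : Int) (h0 : 0 ≤ m) (h1 : m < 12) (b : Bool) :
    pvAcore m (if b then MAJOR_SCALE else MINOR_SCALE) =
      ((PySem.List.pyGet? (if b then MAJOR_DEGREE else MINOR_DEGREE) m).getD 0) := by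
  cases b <;> interval_cases m <;> decide

-- ===== VERDICT (by name: the statement is the Claim_ definition above) =====
theorem root_to_degree_spec : Claim_equal_root_to_degree := by
  intro r t mode _
  show root_to_degree r t mode = root_to_degree_alt r t mode
  unfold root_to_degree root_to_degree_alt
  have h := pvCore_eq (PySem.Int.mod (r - t) 12)
    (PySem.Int.mod_nonneg _ (by norm_num)) (PySem.Int.mod_lt _ (by norm_num))
    (decide (mode = "major" ∨ mode = "lydian" ∨ mode = "mixolydian"))
  by_cases hm : mode = "major" ∨ mode = "lydian" ∨ mode = "mixolydian" <;>
    simp [hm] at h ⊢ <;> exact h
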